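-- pv_equiv track=rewrite | github.com/tipa16384/adventofcode | 2024/day9funcs.py | free_generator
-- ===== SOURCE A (Python) =====
-- def free_generator(file_system: list):
--     current_start = None
--     count = 0
--     for i, token in enumerate(file_system):
--         if token == -1:
--             if current_start is None:
--                 current_start = i
--             count += 1
--         else:
--             if current_start is not None:
--                 yield (-1, current_start, count)
--                 current_start = None
--                 count = 0
--     if current_start is not None:
--         yield (-1, current_start, count)
-- ===== SOURCE B (Python) =====
-- def free_generator(file_system):
--     # run-splitting scan: consume each maximal run of equal "freeness" at once
--     i, n = 0, len(file_system)
--     while i < n: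
--         free = file_system[i] == -1
--         j = i + 1
--         while j < n and (file_system[j] == -1) == free:
--             j += 1
--         if free:
--             yield (-1, i, j - i)
--         i = j
-- ===== Notes on version B (the rewrite author's own statement) =====
-- stated objective: simpler
-- what changed: Replaced A's element-by-element current_start/count state machine (with a trailing flush) by a two-pointer scan that consumes each maximal run of equal freeness at once and yields directly, so no carried state or final-flush block is needed.
import Mathlib
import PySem

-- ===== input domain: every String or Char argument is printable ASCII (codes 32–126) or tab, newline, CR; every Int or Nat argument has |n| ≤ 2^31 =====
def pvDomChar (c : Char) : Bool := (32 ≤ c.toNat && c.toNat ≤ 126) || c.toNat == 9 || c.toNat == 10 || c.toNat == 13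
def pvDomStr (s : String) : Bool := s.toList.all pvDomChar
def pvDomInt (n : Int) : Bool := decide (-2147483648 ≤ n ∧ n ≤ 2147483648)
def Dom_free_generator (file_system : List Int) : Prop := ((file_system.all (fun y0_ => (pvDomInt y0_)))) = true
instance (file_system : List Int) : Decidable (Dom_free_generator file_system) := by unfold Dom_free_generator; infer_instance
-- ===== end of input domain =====

-- B replaces A's explicit current_start/count state machine (with trailing flush) by a
-- run-splitting scan that consumes each maximal run at once; same cost, simpler decomposition.
-- A is a Python generator; both ports return the materialized list of yielded tuples.


-- ===== PORT A =====
-- one step of A's loop body: state = (current_start, count, yielded-so-far)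
def pvStepA (s : Option Int × Int × List (Int × Int × Int)) (p : Int × Int) :
    Option Int × Int × List (Int × Int × Int) :=
  match p.2 == -1, s.1 with
  | true,  none   => (some p.1, s.2.1 + 1, s.2.2)
  | true,  some c => (some c, s.2.1 + 1, s.2.2)
  | false, some c => (none, 0, s.2.2 ++ [(-1, c, s.2.1)])
  | false, none   => s

-- the trailing "if current_start is not None: yield" flush
def pvFinishA (s : Option Int × Int × List (Int × Int × Int)) : List (Int × Int × Int) :=
  match s.1 with
  | some c => s.2.2 ++ [(-1, c, s.2.1)]
  | none => s.2.2

def free_generator (file_system : List Int) : List (Int × Int × Int) :=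
  pvFinishA ((PySem.List.enumerate file_system 0).foldl pvStepA (none, 0, []))

-- ===== PORT B =====
-- B's outer while loop: each iteration consumes one maximal run of equal "freeness"
def pvRunsB : List Int → Int → List (Int × Int × Int)
  | [], _ => []
  | t :: rest, i =>
    let free := t == -1
    let run := rest.takeWhile (fun x => (x == -1) == free)
    let n : Int := 1 + run.length
    (if free then [((-1 : Int), i, n)] else []) ++ pvRunsB (rest.drop run.length) (i + n)
termination_by l _ => l.length
decreasing_by simp [List.length_drop]

def free_generator_alt (file_system : List Int) : List (Int × Int × Int) :=
  pvRunsB file_system 0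

-- ===== PRECONDITION & SPEC =====
def Spec_free_generator (file_system : List Int) (out : List (Int × Int × Int)) : Prop := out = free_generator_alt file_system
instance (file_system : List Int) (out : List (Int × Int × Int)) : Decidable (Spec_free_generator file_system out) := by unfold Spec_free_generator; infer_instance

-- ===== CLAIM (what is proved, stated in full; the proofs are below) =====
def Claim_equal_free_generator : Prop := ∀ (file_system : List Int), Dom_free_generator file_system → Spec_free_generator file_system (free_generator file_system)

-- ===== LEMMAS AND PROOFS =====

-- length of the leading free run
def pvKfn (l : List Int) : Nat := (l.takeWhile (fun x => x == (-1 : Int))).length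

-- skipping one non-free element does not change B's output
theorem pvRunsB_skip (t : Int) (l : List Int) (i : Int) (ht : (t == -1) = false) :
    pvRunsB (t :: l) i = pvRunsB l (i + 1) := by
  cases l with
  | nil => simp [pvRunsB, ht]
  | cons u l2 =>
    by_cases hu : (u == -1) = true
    · simp [pvRunsB, ht, hu]
    · rw [Bool.not_eq_true] at hu
      conv_lhs => rw [pvRunsB]
      conv_rhs => rw [pvRunsB]
      simp [ht, hu]
      congr 1
      ring

theorem pvMain (l : List Int) : ∀ (i : Int) (acc : List (Int × Int × Int)),
    (pvFinishA ((PySem.List.enumerate l i).foldl pvStepA (none, 0, acc)) = acc ++ pvRunsB l i)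
    ∧ ∀ (c cnt : Int),
      pvFinishA ((PySem.List.enumerate l i).foldl pvStepA (some c, cnt, acc)) =
        acc ++ ((-1, c, cnt + (pvKfn l : Int)) :: pvRunsB (l.drop (pvKfn l)) (i + (pvKfn l : Int))) := by
  induction l with
  | nil =>
    intro i acc
    refine ⟨by simp [PySem.List.enumerate, pvFinishA, pvRunsB], ?_⟩
    intro c cnt
    simp [PySem.List.enumerate, pvFinishA, pvRunsB, pvKfn]
  | cons t l ih =>
    intro i acc
    by_cases ht : (t == -1) = true
    · have ht' : t = -1 := eq_of_beq ht
      have hpred2 : (fun x : Int => (x == -1) == true) = (fun x : Int => x == (-1 : Int)) := by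
        funext x; simp
      constructor
      · rw [PySem.List.enumerate_cons]
        simp only [List.foldl_cons, pvStepA, ht, zero_add]
        rw [(ih (i + 1) acc).2 i 1]
        conv_rhs => rw [pvRunsB]
        simp only [ht, if_true, pvKfn, hpred2, List.singleton_append]
        ring_nf
      · intro c cnt
        rw [PySem.List.enumerate_cons]
        simp only [List.foldl_cons, pvStepA, ht]
        rw [(ih (i + 1) acc).2 c (cnt + 1)]
        have hk : pvKfn (t :: l) = 1 + pvKfn l := by
          simp [pvKfn, ht]; omega
        rw [hk]
        have hd : (t :: l).drop (1 + pvKfn l) = l.drop (pvKfn l) := by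
          rw [Nat.add_comm, List.drop_succ_cons]
        rw [hd]
        push_cast
        ring_nf
    · rw [Bool.not_eq_true] at ht
      constructor
      · rw [PySem.List.enumerate_cons]
        simp only [List.foldl_cons, pvStepA, ht]
        rw [(ih (i + 1) acc).1]
        rw [pvRunsB_skip t l i ht]
      · intro c cnt
        rw [PySem.List.enumerate_cons]
        simp only [List.foldl_cons, pvStepA, ht]
        rw [(ih (i + 1) (acc ++ [(-1, c, cnt)])).1]
        have hk : pvKfn (t :: l) = 0 := by simp [pvKfn, ht]
        rw [hk, ← pvRunsB_skip t l i ht]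
        simp

-- ===== VERDICT (by name: the statement is the Claim_ definition above) =====
theorem free_generator_spec : Claim_equal_free_generator := by
  intro fs _
  unfold Spec_free_generator free_generator free_generator_alt
  simpa using (pvMain fs 0 []).1
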